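-- pv_equiv track=rewrite | github.com/yousefjan/PRIDICT2_Lib_Variable | saturation_library/main.py | trim_string
-- ===== SOURCE A (Python) =====
-- def trim_string(seq, sseq) -> str:
--     """Returns a subsequence of <seq> that accomodates RTTs with at least 1 bp in <sseq>
--
--     MAINTAINS FRAME
--     """
--     # returns substring of seq in same frame
--     index = seq.find(sseq)
--     start = 0
--
--     while start < index-41:
--         start += 3
--
--     end = min(len(seq), index + len(sseq) + 8*3)
--     trimmed_string = seq[start:end]
--
--     return trimmed_string
-- ===== SOURCE B (Python) =====
-- def trim_string(seq, sseq) -> str: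
--     """Same frame-preserving trim: start from modular rounding, end clamped by the slice itself."""
--     index = seq.find(sseq)
--     d = index - 41
--     start = 0 if d <= 0 else d + (-d) % 3
--     return seq[start : index + len(sseq) + 24]
-- ===== Notes on version B (the rewrite author's own statement) =====
-- stated objective: simpler
-- what changed: A's step-by-3 counting while-loop for start is replaced by one modular-rounding branch (start = 0 if index-41 <= 0 else (index-41) + (-(index-41)) % 3), and the explicit min(len(seq), ...) is dropped because Python slicing clamps the stop bound itself.
import Mathlib
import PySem

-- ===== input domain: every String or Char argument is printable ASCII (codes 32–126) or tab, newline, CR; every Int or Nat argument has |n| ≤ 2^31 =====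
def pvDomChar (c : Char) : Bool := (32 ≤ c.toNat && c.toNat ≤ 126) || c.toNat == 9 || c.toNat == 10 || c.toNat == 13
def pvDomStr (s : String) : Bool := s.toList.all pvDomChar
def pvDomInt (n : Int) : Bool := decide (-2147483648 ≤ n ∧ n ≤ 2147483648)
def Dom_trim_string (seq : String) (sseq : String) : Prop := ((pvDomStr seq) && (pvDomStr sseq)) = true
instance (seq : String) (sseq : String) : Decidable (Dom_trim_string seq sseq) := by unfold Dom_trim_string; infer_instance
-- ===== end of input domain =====

-- B computes start by one modular-rounding branch instead of A's counting loop, and drops A's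
-- explicit min(len(seq), …): Python slicing clamps the stop bound itself (objective: simpler).

-- ===== PORT A =====
-- A's 'while start < bound: start += 3' loop
def trimLoopA (start : Int) (bound : Int) : Int :=
  if start < bound then trimLoopA (start + 3) bound else start
termination_by (bound - start).toNat
decreasing_by omega

def trim_string (seq : String) (sseq : String) : String :=
  let index := PySem.Str.find seq sseq
  let start := trimLoopA 0 (index - 41)
  let stop := min (seq.toList.length : Int) (index + (sseq.toList.length : Int) + 8 * 3)
  PySem.Str.slice seq (some start) (some stop)

-- ===== PORT B =====
def trim_string_alt (seq : String) (sseq : String) : String :=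
  let index := PySem.Str.find seq sseq
  let d := index - 41
  let start := if d ≤ 0 then 0 else d + PySem.Int.mod (-d) 3
  PySem.Str.slice seq (some start) (some (index + (sseq.toList.length : Int) + 24))

-- ===== PRECONDITION & SPEC =====
def Spec_trim_string (seq : String) (sseq : String) (out : String) : Prop := out = trim_string_alt seq sseq
instance (seq : String) (sseq : String) (out : String) : Decidable (Spec_trim_string seq sseq out) := by unfold Spec_trim_string; infer_instance

-- ===== CLAIM (what is proved, stated in full; the proofs are below) =====
def Claim_equal_trim_string : Prop := ∀ (seq : String) (sseq : String), Dom_trim_string seq sseq → Spec_trim_string seq sseq (trim_string seq sseq)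

-- ===== LEMMAS AND PROOFS =====

-- A's loop lands on the first value ≥ bound in start's residue class mod 3
theorem trimLoopA_eq (start bound : Int) :
    trimLoopA start bound = if start < bound then bound + (start - bound) % 3 else start := by
  by_cases h : start < bound
  · rw [trimLoopA, if_pos h, trimLoopA_eq (start + 3) bound]
    split_ifs with h2 <;> omega
  · rw [trimLoopA, if_neg h, if_neg h]
termination_by (bound - start).toNat
decreasing_by omega

-- the Python find result is -1 or a valid index
theorem find_ge_neg_one (s sub : String) : -1 ≤ PySem.Str.find s sub := by
  by_cases h : PySem.Str.find s sub = -1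
  · omega
  · have := (PySem.Str.find_ne_neg_one_iff (s := s) (sub := sub)).mp h
    have := (PySem.Str.find_nonneg_iff (s := s) (sub := sub)).mpr this
    omega

-- a slice's stop bound past the length clamps: the explicit min is redundant
theorem slice_min_stop (l : List Char) (a b : Int) (ha : 0 ≤ a) (hb : 0 ≤ b) :
    PySem.List.slice l (some a) (some (min (l.length : Int) b)) =
      PySem.List.slice l (some a) (some b) := by
  rw [PySem.List.slice_toNat l ha (by omega), PySem.List.slice_toNat l ha hb]
  apply List.take_eq_take_iff.mpr
  simp [List.length_drop]
  omega

-- ===== VERDICT (by name: the statement is the Claim_ definition above) =====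
theorem trim_string_spec : Claim_equal_trim_string := by
  intro seq sseq _
  show _ = _
  simp only [trim_string, trim_string_alt]
  have hidx := find_ge_neg_one seq sseq
  set index := PySem.Str.find seq sseq with hdef
  have hstart : trimLoopA 0 (index - 41) =
      (if index - 41 ≤ 0 then 0 else index - 41 + PySem.Int.mod (-(index - 41)) 3) := by
    rw [trimLoopA_eq, PySem.Int.mod_eq_emod_of_pos (by omega : (0:Int) < 3)]
    split_ifs with h1 h2 h2 <;> omega
  rw [hstart]
  have hs : 0 ≤ (if index - 41 ≤ 0 then 0 else index - 41 + PySem.Int.mod (-(index - 41)) 3) := by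
    rw [PySem.Int.mod_eq_emod_of_pos (by omega : (0:Int) < 3)]
    have := Int.emod_nonneg (-(index - 41)) (by omega : (3:Int) ≠ 0)
    split_ifs <;> omega
  have hb : (0:Int) ≤ index + (sseq.toList.length : Int) + 24 := by
    have : (0:Int) ≤ (sseq.toList.length : Int) := by positivity
    omega
  have hlist := slice_min_stop seq.toList
      (if index - 41 ≤ 0 then 0 else index - 41 + PySem.Int.mod (-(index - 41)) 3)
      (index + (sseq.toList.length : Int) + 24) hs hb
  have : (8:Int) * 3 = 24 := by norm_num
  rw [this]
  apply String.toList_injective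
  rw [PySem.Str.toList_slice, PySem.Str.toList_slice, PySem.Chars.slice_eq_listSlice,
    PySem.Chars.slice_eq_listSlice]
  exact hlist
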